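-- pv_equiv track=rewrite | github.com/MrCsabaToth/IK | 2019Nov/practice1/lex_order1.py | solve
-- ===== SOURCE A (Python) =====
-- def solve(arr):
--     dic = dict()
--     for item in arr:
--         keyval = item.split(" ")
--
--         if keyval[0] not in dic:
--             dic[keyval[0]] = [keyval[1]]
--         else:
--             dic[keyval[0]].append(keyval[1])
--
--     return ["{}:{},{}".format(kv[0], len(kv[1]), sorted(kv[1])[-1]) for kv in dic.items()]
-- ===== SOURCE B (Python) =====
-- def solve(arr):
--     agg = {}
--     for item in arr:
--         keyval = item.split(" ")
--         k = keyval[0]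
--         v = keyval[1]
--         if k in agg:
--             c, m = agg[k]
--             agg[k] = (c + 1, m if m > v else v)
--         else:
--             agg[k] = (1, v)
--     return ["{}:{},{}".format(k, cm[0], cm[1]) for k, cm in agg.items()]
-- ===== Notes on version B (the rewrite author's own statement) =====
-- stated objective: simpler
-- what changed: B keeps one running (count, max) aggregate per key instead of A's per-key value lists that are counted and sorted in a second pass, so the output is built directly from the aggregates and the sorted/second pass disappears.
import Mathlib
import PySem

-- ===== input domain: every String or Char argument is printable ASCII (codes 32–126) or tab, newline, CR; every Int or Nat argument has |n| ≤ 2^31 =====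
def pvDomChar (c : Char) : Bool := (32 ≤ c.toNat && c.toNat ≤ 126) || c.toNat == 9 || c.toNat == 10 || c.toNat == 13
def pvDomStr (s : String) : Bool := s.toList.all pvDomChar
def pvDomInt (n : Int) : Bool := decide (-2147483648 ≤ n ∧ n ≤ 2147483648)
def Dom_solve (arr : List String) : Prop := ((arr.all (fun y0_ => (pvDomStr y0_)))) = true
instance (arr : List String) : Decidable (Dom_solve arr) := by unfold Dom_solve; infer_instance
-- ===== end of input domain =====

-- B replaces A's per-key value lists (counted and sorted in a second pass) by a single
-- running (count, max) aggregate per key, built in the one grouping pass.  Objective: simpler.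

-- "{}:{},{}".format(k, c, m)
def pyFmt (k : String) (c : Int) (m : String) : String :=
  k ++ ":" ++ PySem.Int.toStr c ++ "," ++ m

-- ===== PORT A =====
-- A's loop body
def stepA (dic : PySem.Dict String (List String)) (item : String) :
    PySem.Dict String (List String) :=
  let keyval := (PySem.Str.split? item " ").getD []
  let k := (PySem.List.pyGet? keyval 0).getD ""
  let v := (PySem.List.pyGet? keyval 1).getD ""   -- none = IndexError, excluded by Pre_
  if dic.contains k = false then dic.insert k [v]
  else dic.modify k [] (fun l => l ++ [v])

def solve (arr : List String) : List String :=
  let dic := arr.foldl stepA PySem.Dict.empty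
  dic.items.map (fun kv =>
    pyFmt kv.1 (kv.2.length : Int)
      ((PySem.List.pyGet? (PySem.List.sorted kv.2 (fun x => x) false) (-1)).getD ""))

-- ===== PORT B =====
-- B's loop body
def stepB (agg : PySem.Dict String (Int × String)) (item : String) :
    PySem.Dict String (Int × String) :=
  let keyval := (PySem.Str.split? item " ").getD []
  let k := (PySem.List.pyGet? keyval 0).getD ""
  let v := (PySem.List.pyGet? keyval 1).getD ""   -- none = IndexError, excluded by Pre_
  if agg.contains k = true then
    let cm := agg.getD k (0, "")
    agg.insert k (cm.1 + 1, if cm.2 > v then cm.2 else v)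
  else agg.insert k (1, v)

def solve_alt (arr : List String) : List String :=
  let agg := arr.foldl stepB PySem.Dict.empty
  agg.items.map (fun kv => pyFmt kv.1 kv.2.1 kv.2.2)

-- ===== PRECONDITION & SPEC =====
-- Pre_: every item contains a space, so item.split(" ")[1] exists; on other items Python A
-- raises IndexError.
def Pre_solve (arr : List String) : Prop :=
  (arr.all (fun item => PySem.Str.isIn " " item)) = true
instance (arr : List String) : Decidable (Pre_solve arr) := by unfold Pre_solve; infer_instance

def pvWitness_solve : List String := ["a 1", "b 2", "a 3"]

def Spec_solve (arr : List String) (out : List String) : Prop := out = solve_alt arr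
instance (arr : List String) (out : List String) : Decidable (Spec_solve arr out) := by unfold Spec_solve; infer_instance

-- ===== CLAIM (what is proved, stated in full; the proofs are below) =====
def Claim_equal_solve : Prop := ∀ (arr : List String), Dom_solve arr → Pre_solve arr → Spec_solve arr (solve arr)

-- ===== LEMMAS AND PROOFS =====

-- the running maximum B maintains, as a function of A's per-key list
def maxOf : List String → String
  | [] => ""
  | h :: t => t.foldl (fun a b => if a > b then a else b) h

-- abstraction from A's per-key list to B's per-key aggregate
def absEntry (kv : String × List String) : String × (Int × String) :=
  (kv.1, ((kv.2.length : Int), maxOf kv.2))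

def absD (d : PySem.Dict String (List String)) : PySem.Dict String (Int × String) :=
  PySem.Dict.mk (d.items.map absEntry)

theorem if_gt_eq_max (a b : String) : (if a > b then a else b) = max a b := by
  rw [max_def]
  rcases lt_trichotomy a b with h | h | h
  · simp [h.le, not_lt.mpr h.le]
  · simp [h]
  · simp [h, not_le.mpr h]

theorem maxOf_append_singleton (l : List String) (v : String) :
    maxOf (l ++ [v]) = if maxOf l > v then maxOf l else v := by
  cases l with
  | nil => simp [maxOf]
  | cons h t => simp [maxOf, List.foldl_append]

theorem contains_absD (d : PySem.Dict String (List String)) (k : String) :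
    (absD d).contains k = d.contains k := by
  simp [absD, PySem.Dict.contains, List.any_map, Function.comp_def, absEntry]

theorem get?_absD (d : PySem.Dict String (List String)) (k : String) :
    (absD d).get? k = (d.get? k).map (fun l => ((l.length : Int), maxOf l)) := by
  simp only [absD, PySem.Dict.get?, List.find?_map]
  have hpred : ((fun p : String × (Int × String) => p.1 == k) ∘ absEntry)
      = (fun p : String × List String => p.1 == k) := by
    funext p; simp [absEntry]
  rw [hpred]
  cases List.find? (fun p : String × List String => p.1 == k) d.1 <;> simp [absEntry]

theorem getD_absD (d : PySem.Dict String (List String)) (k : String) :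
    (absD d).getD k (0, "") = (((d.getD k []).length : Int), maxOf (d.getD k [])) := by
  simp only [PySem.Dict.getD, get?_absD]
  cases d.get? k <;> simp [maxOf]

-- one dictionary update commutes with the abstraction
theorem step_comm_kv (d : PySem.Dict String (List String)) (k v : String) :
    absD (if d.contains k = false then d.insert k [v]
          else d.modify k [] (fun l => l ++ [v]))
    = (if (absD d).contains k = true then
        (absD d).insert k (((absD d).getD k (0, "")).1 + 1,
          if ((absD d).getD k (0, "")).2 > v then ((absD d).getD k (0, "")).2 else v)
      else (absD d).insert k (1, v)) := by
  cases hc : d.contains k with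
  | false =>
    have hca : (absD d).contains k = false := by rw [contains_absD, hc]
    rw [if_pos rfl, if_neg (by rw [hca]; simp)]
    show absD (d.insert k [v]) = (absD d).insert k (1, v)
    simp only [PySem.Dict.insert, hc, hca, Bool.false_eq_true, reduceIte]
    simp only [absD, List.map_append]
    simp [absEntry, maxOf]
  | true =>
    have hca : (absD d).contains k = true := by rw [contains_absD, hc]
    rw [if_neg (by simp), if_pos hca, getD_absD]
    show absD (d.modify k [] (fun l => l ++ [v])) = _
    simp only [PySem.Dict.modify, PySem.Dict.insert, hc, hca, reduceIte]
    simp only [absD, List.map_map]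
    congr 1
    apply List.map_congr_left
    intro p _
    by_cases hp : p.1 = k
    · simp [absEntry, hp, maxOf_append_singleton]
    · simp [absEntry, hp]

-- one loop iteration commutes with the abstraction
theorem step_comm (d : PySem.Dict String (List String)) (item : String) :
    absD (stepA d item) = stepB (absD d) item := by
  simp only [stepA, stepB]
  exact step_comm_kv d _ _

-- the whole grouping loop commutes with the abstraction
theorem fold_comm (arr : List String) (d : PySem.Dict String (List String)) :
    absD (arr.foldl stepA d) = arr.foldl stepB (absD d) := by
  induction arr generalizing d with
  | nil => rfl
  | cons item rest ih =>
    simp only [List.foldl_cons]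
    rw [← step_comm, ih]

-- sorted(l)[-1] (as totalised in the port) is the running maximum
theorem sortedLast_eq_maxOf (l : List String) :
    ((PySem.List.pyGet? (PySem.List.sorted l (fun x => x) false) (-1)).getD "") = maxOf l := by
  cases l with
  | nil =>
    have h0 : PySem.List.sorted ([] : List String) (fun x => x) false = [] :=
      (PySem.List.sorted_eq_nil_iff _ _ _).mpr rfl
    simp [PySem.List.pyGet?_neg_one, h0, maxOf]
  | cons h t =>
    have hstep : maxOf (h :: t) = t.foldl max h := by
      simp only [maxOf]
      congr 1
      funext a b
      exact if_gt_eq_max a b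
    have hsne : PySem.List.sorted (h :: t) (fun x : String => x) false ≠ [] := by
      rw [Ne, PySem.List.sorted_eq_nil_iff]; simp
    rw [PySem.List.pyGet?_neg_one, List.getLast?_eq_some_getLast hsne, Option.getD_some, hstep]
    -- the last element of the sorted list and the running max are both maxima of h :: t
    have hmax? : PySem.List.max? (h :: t) (fun y => y) = some (t.foldl max h) :=
      PySem.List.max?_id_cons h t
    have hMmem : t.foldl max h ∈ (h :: t) := by
      rcases PySem.List.foldl_max_mem t h with hm | hm
      · rw [hm]; exact List.mem_cons_self
      · exact List.mem_cons_of_mem _ hm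
    have hlast_mem : (PySem.List.sorted (h :: t) (fun x : String => x) false).getLast hsne ∈ (h :: t) := by
      rw [← PySem.List.mem_sorted (h :: t) (fun x : String => x) false]
      exact List.getLast_mem hsne
    apply le_antisymm
    · exact PySem.List.max?_isMax hmax? _ hlast_mem
    · obtain ⟨p, hp, hpe⟩ := List.mem_iff_getElem.mp
        ((PySem.List.mem_sorted (h :: t) (fun x : String => x) false _).mpr hMmem)
      rw [← hpe, List.getLast_eq_getElem]
      exact PySem.List.sorted_id_getElem_mono _ (by omega) (by omega)

-- ===== VERDICT (by name: the statement is the Claim_ definition above) =====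
theorem solve_spec : Claim_equal_solve := by
  intro arr _ _
  show solve arr = solve_alt arr
  simp only [solve, solve_alt]
  rw [show (PySem.Dict.empty : PySem.Dict String (Int × String)) = absD PySem.Dict.empty from rfl,
    ← fold_comm]
  simp only [absD, List.map_map]
  apply List.map_congr_left
  intro kv _
  simp [absEntry, pyFmt, sortedLast_eq_maxOf, Function.comp]
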